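-- pv_equiv track=rewrite | github.com/chalos18/COSC-Studies | COSC367/practice.py | interpretations
-- ===== SOURCE A (Python) =====
-- import itertools
--
-- def interpretations(atoms):
--     atoms = sorted(atoms)
--     intepretations_list = sorted(itertools.product([True, False], repeat = len(atoms)))
--
--     result = []
--     for truth in intepretations_list:
--         interpretation = dict(zip(atoms, truth))
--         result.append(interpretation)
--
--     return result
-- ===== SOURCE B (Python) =====
-- def interpretations(atoms):
--     result = [{}]
--     for atom in sorted(atoms):
--         new = []
--         for d in result:
--             e = dict(d)
--             e[atom] = False
--             new.append(e)
--             f = dict(d)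
--             f[atom] = True
--             new.append(f)
--         result = new
--     return result
-- ===== Notes on version B (the rewrite author's own statement) =====
-- stated objective: faster
-- what changed: Replaces building all 2^n truth tuples with itertools.product and then sorting them with iterative doubling of partial dicts over the sorted atoms (False-extension before True), producing the interpretations directly in sorted order with no tuple sort and no intermediate tuple list.
import Mathlib
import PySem

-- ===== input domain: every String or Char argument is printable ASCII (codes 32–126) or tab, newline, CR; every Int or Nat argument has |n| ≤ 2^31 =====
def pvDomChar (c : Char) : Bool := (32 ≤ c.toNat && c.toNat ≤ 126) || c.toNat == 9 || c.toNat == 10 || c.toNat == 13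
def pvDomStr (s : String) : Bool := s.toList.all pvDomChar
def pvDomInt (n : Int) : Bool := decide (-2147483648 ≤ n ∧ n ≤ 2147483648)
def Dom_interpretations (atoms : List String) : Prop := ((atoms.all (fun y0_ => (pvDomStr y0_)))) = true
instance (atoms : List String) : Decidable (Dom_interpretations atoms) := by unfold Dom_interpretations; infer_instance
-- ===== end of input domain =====

-- B replaces A's product-then-sort enumeration by iterative doubling of partial dicts (no sort of 2^n tuples); same return value.

-- ===== PORT A =====
-- itertools.product([True, False], repeat=n) has no PySem primitive; it is ported by hand,
-- step for step, as the documented pools fold: result = [[]]; for pool in pools: result = [x+[y] for x in result for y in pool].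
def interpretations (atoms : List String) : List (List (String × Bool)) :=
  let atoms2 := PySem.List.sorted atoms (fun x => x)
  let prods := (List.replicate atoms2.length [true, false]).foldl
      (fun res pool => res.flatMap (fun t => pool.map (fun y => t ++ [y]))) ([[]] : List (List Bool))
  let ilist := PySem.List.sorted prods (fun t => t)
  ilist.foldl (fun result truth =>
      result ++ [(PySem.Dict.ofList (atoms2.zip truth)).items]) []

-- ===== PORT B =====
def interpretations_alt (atoms : List String) : List (List (String × Bool)) :=
  let res := (PySem.List.sorted atoms (fun x => x)).foldl
      (fun acc atom => acc.flatMap (fun d => [d.insert atom false, d.insert atom true]))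
      ([PySem.Dict.empty] : List (PySem.Dict String Bool))
  res.map (fun d => d.items)

-- ===== PRECONDITION & SPEC =====
def Spec_interpretations (atoms : List String) (out : List (List (String × Bool))) : Prop := out = interpretations_alt atoms
instance (atoms : List String) (out : List (List (String × Bool))) : Decidable (Spec_interpretations atoms out) := by unfold Spec_interpretations; infer_instance

-- ===== CLAIM (what is proved, stated in full; the proofs are below) =====
def Claim_equal_interpretations : Prop := ∀ (atoms : List String), Dom_interpretations atoms → Spec_interpretations atoms (interpretations atoms)

-- ===== LEMMAS AND PROOFS =====

-- The ascending (Python-sorted) enumeration of all Bool lists of length n: all-False first, last slot fastest.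
def ascBool : Nat → List (List Bool)
  | 0 => [[]]
  | n+1 => (ascBool n).map (false :: ·) ++ (ascBool n).map (true :: ·)

lemma mem_ascBool (n : Nat) (t : List Bool) : t ∈ ascBool n ↔ t.length = n := by
  induction n generalizing t with
  | zero => simp [ascBool, List.length_eq_zero_iff]
  | succ n ih =>
    simp only [ascBool, List.mem_append, List.mem_map]
    constructor
    · rintro (⟨s, hs, rfl⟩ | ⟨s, hs, rfl⟩) <;> simp [(ih s).mp hs]
    · intro h
      cases t with
      | nil => simp at h
      | cons b s =>
        have hs : s ∈ ascBool n := (ih s).mpr (by simpa using h)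
        cases b
        · exact Or.inl ⟨s, hs, rfl⟩
        · exact Or.inr ⟨s, hs, rfl⟩

lemma nodup_ascBool (n : Nat) : (ascBool n).Nodup := by
  induction n with
  | zero => simp [ascBool]
  | succ n ih =>
    refine List.Nodup.append (ih.map ?_) (ih.map ?_) ?_
    · intro a b h; simpa using h
    · intro a b h; simpa using h
    · intro t ht ht'
      simp only [List.mem_map] at ht ht'
      obtain ⟨s, _, rfl⟩ := ht
      obtain ⟨s', _, h⟩ := ht'
      simp at h

lemma pairwise_lt_ascBool (n : Nat) : (ascBool n).Pairwise (· < ·) := by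
  induction n with
  | zero => simp [ascBool]
  | succ n ih =>
    refine List.pairwise_append.mpr ⟨?_, ?_, ?_⟩
    · exact (List.pairwise_map).mpr (ih.imp fun h => List.Lex.cons h)
    · exact (List.pairwise_map).mpr (ih.imp fun h => List.Lex.cons h)
    · intro a ha b hb
      simp only [List.mem_map] at ha hb
      obtain ⟨s, _, rfl⟩ := ha
      obtain ⟨s', _, rfl⟩ := hb
      exact List.Lex.rel (by decide)

-- A's hand-rolled itertools.product fold over n copies of [true, false].
def prodTF (n : Nat) : List (List Bool) :=
  (List.replicate n [true, false]).foldl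
    (fun res pool => res.flatMap (fun t => pool.map (fun y => t ++ [y]))) [[]]

lemma prodTF_succ (n : Nat) :
    prodTF (n+1) = (prodTF n).flatMap (fun t => [t ++ [true], t ++ [false]]) := by
  unfold prodTF
  rw [show (n+1) = n + 1 from rfl, List.replicate_succ' , List.foldl_append]
  simp [List.map]

lemma mem_prodTF (n : Nat) (t : List Bool) : t ∈ prodTF n ↔ t.length = n := by
  induction n generalizing t with
  | zero => simp [prodTF, List.length_eq_zero_iff]
  | succ n ih =>
    rw [prodTF_succ]
    simp only [List.mem_flatMap, List.mem_cons]
    constructor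
    · rintro ⟨s, hs, rfl | (rfl | h)⟩
      · simp [(ih s).mp hs]
      · simp [(ih s).mp hs]
      · simp at h
    · intro h
      rcases List.eq_nil_or_concat t with rfl | ⟨s, b, rfl⟩
      · simp at h
      · have hs : s ∈ prodTF n := (ih s).mpr (by simpa [List.concat_eq_append] using h)
        cases b
        · exact ⟨s, hs, Or.inr (Or.inl (by simp [List.concat_eq_append]))⟩
        · exact ⟨s, hs, Or.inl (by simp [List.concat_eq_append])⟩

lemma nodup_prodTF (n : Nat) : (prodTF n).Nodup := by
  induction n with
  | zero => simp [prodTF]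
  | succ n ih =>
    rw [prodTF_succ, List.nodup_flatMap]
    refine ⟨fun s _ => by simp, ih.imp ?_⟩
    intro a b hne
    simp only [Function.onFun, List.Disjoint]
    intro t ht ht'
    simp only [List.mem_cons, List.not_mem_nil, or_false] at ht ht'
    rcases ht with rfl | rfl <;> rcases ht' with h | h <;>
      refine absurd ?_ hne <;>
      exact (List.append_inj h (by have := congrArg List.length h; simpa using this)).1

lemma sorted_prodTF (n : Nat) :
    PySem.List.sorted (prodTF n) (fun t => t) = ascBool n := by
  have h := PySem.List.sorted_eq_of_perm_of_pairwise_lt (κ := List Bool)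
    (prodTF n) (ascBool n) (fun t => t)
    ((List.perm_ext_iff_of_nodup (nodup_ascBool n) (nodup_prodTF n)).mpr
      (fun t => by rw [mem_ascBool, mem_prodTF]))
    (pairwise_lt_ascBool n)
  have e : @PySem.List.sorted (List Bool) (List Bool) List.instLT (fun a b => a.decidableLT b)
      = @PySem.List.sorted (List Bool) (List Bool) List.instLinearOrder.toLT LinearOrder.toDecidableLT := by
    congr 1
    exact Subsingleton.elim _ _
  rw [e]
  exact h

-- B's doubling step distributes over list append.
lemma foldB_append (ats : List String) (l1 l2 : List (PySem.Dict String Bool)) :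
    ats.foldl (fun acc atom => acc.flatMap (fun d => [d.insert atom false, d.insert atom true])) (l1 ++ l2)
      = ats.foldl (fun acc atom => acc.flatMap (fun d => [d.insert atom false, d.insert atom true])) l1
        ++ ats.foldl (fun acc atom => acc.flatMap (fun d => [d.insert atom false, d.insert atom true])) l2 := by
  induction ats generalizing l1 l2 with
  | nil => rfl
  | cons a rest ih => simp only [List.foldl_cons, List.flatMap_append, ih]

-- Core invariant: doubling from a single seed dict enumerates exactly the ascending truth vectors zipped in.
lemma foldB_eq (ats : List String) (d : PySem.Dict String Bool) :
    ats.foldl (fun acc atom => acc.flatMap (fun d => [d.insert atom false, d.insert atom true])) [d]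
      = (ascBool ats.length).map
          (fun t => (ats.zip t).foldl (fun e p => e.insert p.1 p.2) d) := by
  induction ats generalizing d with
  | nil => rfl
  | cons a rest ih =>
    have : ([d.insert a false, d.insert a true] : List (PySem.Dict String Bool))
        = [d.insert a false] ++ [d.insert a true] := rfl
    simp only [List.foldl_cons, List.flatMap_cons, List.flatMap_nil, List.append_nil, this,
      foldB_append, ih]
    simp only [List.length_cons, ascBool, List.map_append, List.map_map]
    congr 1

-- A's append-accumulating result loop is a map.
lemma foldA_map_gen (l : List (List Bool)) (f : List Bool → List (String × Bool))
    (acc : List (List (String × Bool))) :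
    l.foldl (fun result truth => result ++ [f truth]) acc = acc ++ l.map f := by
  induction l generalizing acc with
  | nil => simp
  | cons t rest ih => simp [ih]

lemma foldA_map (l : List (List Bool)) (f : List Bool → List (String × Bool)) :
    l.foldl (fun result truth => result ++ [f truth]) [] = l.map f := by
  simpa using foldA_map_gen l f []

-- ===== VERDICT (by name: the statement is the Claim_ definition above) =====
theorem interpretations_spec : Claim_equal_interpretations := by
  intro atoms _
  show interpretations atoms = interpretations_alt atoms
  unfold interpretations interpretations_alt
  rw [foldA_map, show ∀ n, (List.replicate n [true, false]).foldl
        (fun res pool => res.flatMap (fun t => pool.map (fun y => t ++ [y]))) [[]] = prodTF n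
      from fun _ => rfl,
    sorted_prodTF, foldB_eq, List.map_map]
  rfl
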